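-- pv_equiv track=rewrite | github.com/mirkoWolf01/introProgramacion | Parcial.py | torneo_de_gallinas
-- ===== SOURCE A (Python) =====
-- def torneo_de_gallinas(estrategias: dict[str, str]) -> dict[str, int]:
--     jugadores: list[tuple[str, str]] = list(estrategias.items())
--     res: dict[str, str] = {}
--     for i in range(len(jugadores)):
--         jugador: tuple[str, str] = jugadores[i]
--         estrategia_jugador: str = jugador[1]
--         for n in range(len(jugadores)):
--             if jugador[0] != jugadores[n][0]:
--                 estrategia_contrincante: str = jugadores[n][1]
--                 if estrategia_jugador == "me desvio siempre":
--                     if estrategia_contrincante == "me desvio siempre":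
--                         sumar_valor(jugador[0], -10, res)
--                     if estrategia_contrincante == "me la banco y no me desvio":
--                         sumar_valor(jugador[0], -15, res)
--                 else:
--                     if estrategia_contrincante == "me desvio siempre":
--                         sumar_valor(jugador[0], 10, res)
--                     if estrategia_contrincante == "me la banco y no me desvio":
--                         sumar_valor(jugador[0], -5, res)
--     return res
--
-- def sumar_valor(clave: str, n: int, dict: dict[str, int]):
--     if clave in dict.keys():
--         dict[clave] += n
--     else:
--         dict[clave] = n
-- ===== SOURCE B (Python) =====
-- def torneo_de_gallinas(estrategias: dict[str, str]) -> dict[str, int]: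
--     # One pass: count each strategy once, then each player's score is a closed form.
--     vals = list(estrategias.values())
--     d_total = vals.count("me desvio siempre")
--     b_total = vals.count("me la banco y no me desvio")
--     res: dict[str, int] = {}
--     for nombre, s in estrategias.items():
--         if s == "me desvio siempre":
--             d = d_total - 1
--             b = b_total
--             score = -10 * d - 15 * b
--         else:
--             d = d_total
--             b = b_total - 1 if s == "me la banco y no me desvio" else b_total
--             score = 10 * d - 5 * b
--         if d + b > 0:
--             res[nombre] = score
--     return res
-- ===== Notes on version B (the rewrite author's own statement) =====
-- stated objective: faster
-- what changed: Replaced the quadratic all-pairs double loop with a single counting pass: the two strategy totals are computed once and each player's score (and whether it appears in the result at all) is a closed form from those totals minus the player's own entry.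
import Mathlib
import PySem

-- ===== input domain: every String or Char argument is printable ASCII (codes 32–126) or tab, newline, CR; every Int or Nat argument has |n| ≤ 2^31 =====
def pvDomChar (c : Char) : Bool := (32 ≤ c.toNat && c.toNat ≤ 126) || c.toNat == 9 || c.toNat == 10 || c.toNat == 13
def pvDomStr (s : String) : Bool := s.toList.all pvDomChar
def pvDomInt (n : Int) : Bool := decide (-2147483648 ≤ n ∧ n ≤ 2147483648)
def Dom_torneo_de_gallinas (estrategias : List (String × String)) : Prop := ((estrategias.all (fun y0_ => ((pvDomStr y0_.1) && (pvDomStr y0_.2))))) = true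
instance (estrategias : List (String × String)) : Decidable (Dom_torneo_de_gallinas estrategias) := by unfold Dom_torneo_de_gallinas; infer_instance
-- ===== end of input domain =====

-- B replaces A's quadratic all-pairs loop by one counting pass (strategy totals once, each
-- score a closed form from the totals minus the player's own entry); objective: faster.

-- ===== PORT A =====
def sumar_valor (clave : String) (n : Int) (dict : PySem.Dict String Int) : PySem.Dict String Int :=
  if (PySem.Dict.keys dict).contains clave then
    PySem.Dict.insert dict clave (PySem.Dict.getD dict clave 0 + n)
  else
    PySem.Dict.insert dict clave n

def torneo_de_gallinas (estrategias : List (String × String)) : List (String × Int) :=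
  let jugadores : List (String × String) := estrategias
  let res : PySem.Dict String Int :=
    (PySem.List.pyRange 0 (jugadores.length : Int) 1).foldl (fun res i =>
      let jugador : String × String := PySem.List.pyGetD jugadores i ("", "")
      let estrategia_jugador : String := jugador.2
      (PySem.List.pyRange 0 (jugadores.length : Int) 1).foldl (fun res n =>
        if jugador.1 != (PySem.List.pyGetD jugadores n ("", "")).1 then
          let estrategia_contrincante : String := (PySem.List.pyGetD jugadores n ("", "")).2
          if estrategia_jugador == "me desvio siempre" then
            let res := if estrategia_contrincante == "me desvio siempre" then sumar_valor jugador.1 (-10) res else res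
            if estrategia_contrincante == "me la banco y no me desvio" then sumar_valor jugador.1 (-15) res else res
          else
            let res := if estrategia_contrincante == "me desvio siempre" then sumar_valor jugador.1 10 res else res
            if estrategia_contrincante == "me la banco y no me desvio" then sumar_valor jugador.1 (-5) res else res
        else res) res) PySem.Dict.empty
  res.items

-- ===== PORT B =====
def torneo_de_gallinas_alt (estrategias : List (String × String)) : List (String × Int) :=
  let vals : List String := estrategias.map Prod.snd
  let d_total : Int := (vals.count "me desvio siempre" : Int)
  let b_total : Int := (vals.count "me la banco y no me desvio" : Int)
  let res : PySem.Dict String Int :=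
    estrategias.foldl (fun res p =>
      let dbs : Int × Int × Int :=
        if p.2 == "me desvio siempre" then
          (d_total - 1, b_total, -10 * (d_total - 1) - 15 * b_total)
        else
          let b : Int := if p.2 == "me la banco y no me desvio" then b_total - 1 else b_total
          (d_total, b, 10 * d_total - 5 * b)
      if dbs.1 + dbs.2.1 > 0 then PySem.Dict.insert res p.1 dbs.2.2 else res) PySem.Dict.empty
  res.items

-- ===== PRECONDITION & SPEC =====
-- A's parameter is a Python dict, whose keys are necessarily distinct; Pre_ only rules out
-- association lists with duplicate keys, which represent no dict and no input A can receive.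
def Pre_torneo_de_gallinas (estrategias : List (String × String)) : Prop :=
  (estrategias.map Prod.fst).Nodup
instance (estrategias : List (String × String)) : Decidable (Pre_torneo_de_gallinas estrategias) := by unfold Pre_torneo_de_gallinas; infer_instance

def pvWitness_torneo_de_gallinas : (List (String × String)) :=
  [("ana", "me desvio siempre"), ("bob", "me la banco y no me desvio"), ("eva", "paso")]

def Spec_torneo_de_gallinas (estrategias : List (String × String)) (out : List (String × Int)) : Prop := out = torneo_de_gallinas_alt estrategias
instance (estrategias : List (String × String)) (out : List (String × Int)) : Decidable (Spec_torneo_de_gallinas estrategias out) := by unfold Spec_torneo_de_gallinas; infer_instance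

-- ===== CLAIM (what is proved, stated in full; the proofs are below) =====
def Claim_equal_torneo_de_gallinas : Prop := ∀ (estrategias : List (String × String)), Dom_torneo_de_gallinas estrategias → Pre_torneo_de_gallinas estrategias → Spec_torneo_de_gallinas estrategias (torneo_de_gallinas estrategias)


-- ===== LEMMAS AND PROOFS =====

-- The value A's inner loop adds to player (k, s)'s score for opponent entry e (none = nothing added).
def pvFval (k s : String) (e : String × String) : Option Int :=
  if e.1 = k then none
  else if s = "me desvio siempre" then
    if e.2 = "me desvio siempre" then some (-10)
    else if e.2 = "me la banco y no me desvio" then some (-15) else none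
  else
    if e.2 = "me desvio siempre" then some 10
    else if e.2 = "me la banco y no me desvio" then some (-5) else none

-- A's inner-loop body (port A's inner lambda, with the indexed element as a parameter).
def pvStepA (jug : String × String) (res : PySem.Dict String Int) (e : String × String) : PySem.Dict String Int :=
  if jug.1 != e.1 then
    if jug.2 == "me desvio siempre" then
      let res := if e.2 == "me desvio siempre" then sumar_valor jug.1 (-10) res else res
      if e.2 == "me la banco y no me desvio" then sumar_valor jug.1 (-15) res else res
    else
      let res := if e.2 == "me desvio siempre" then sumar_valor jug.1 10 res else res
      if e.2 == "me la banco y no me desvio" then sumar_valor jug.1 (-5) res else res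
  else res

-- B's loop body (port B's lambda, with the two strategy totals as parameters).
def pvStepB (d_total b_total : Int) (res : PySem.Dict String Int) (p : String × String) : PySem.Dict String Int :=
  let dbs : Int × Int × Int :=
    if p.2 == "me desvio siempre" then
      (d_total - 1, b_total, -10 * (d_total - 1) - 15 * b_total)
    else
      let b : Int := if p.2 == "me la banco y no me desvio" then b_total - 1 else b_total
      (d_total, b, 10 * d_total - 5 * b)
  if dbs.1 + dbs.2.1 > 0 then PySem.Dict.insert res p.1 dbs.2.2 else res

-- opponents of player (k, _) that play each of the two recognized strategies
def pvCD (l : List (String × String)) (k : String) : Nat :=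
  l.countP (fun e => decide (e.1 ≠ k) && decide (e.2 = "me desvio siempre"))
def pvCB (l : List (String × String)) (k : String) : Nat :=
  l.countP (fun e => decide (e.1 ≠ k) && decide (e.2 = "me la banco y no me desvio"))

lemma pvContains_false (d : PySem.Dict String Int) (k : String) (h : k ∉ d.keys) :
    d.contains k = false := by
  cases hc : d.contains k with
  | false => rfl
  | true => exact absurd ((PySem.Dict.contains_iff_mem_keys d k).mp hc) h

lemma pvNotMem_of_contains_false (d : PySem.Dict String Int) (k : String)
    (h : d.contains k = false) : k ∉ d.keys := by
  intro hm; rw [← PySem.Dict.contains_iff_mem_keys] at hm; simp [h] at hm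

lemma pvStepA_eq (k s : String) (res : PySem.Dict String Int) (e : String × String) :
    pvStepA (k, s) res e = match pvFval k s e with
      | some v => sumar_valor k v res
      | none => res := by
  by_cases h1 : e.1 = k
  · simp [pvStepA, pvFval, h1, bne]
  · by_cases h2 : s = "me desvio siempre" <;> by_cases h3 : e.2 = "me desvio siempre" <;>
      by_cases h4 : e.2 = "me la banco y no me desvio" <;>
      first
        | (exfalso; rw [h3] at h4; exact absurd h4 (by decide))
        | simp [pvStepA, pvFval, h1, h2, h3, h4, bne, Ne.symm h1]

lemma pvSumarFoldGo (k : String) (res0 : PySem.Dict String Int)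
    (h : res0.contains k = false) (hnd : res0.keys.Nodup) :
    ∀ (t : List Int) (c : Int),
      t.foldl (fun r v => sumar_valor k v r) (PySem.Dict.mk (res0.items ++ [(k, c)]))
        = PySem.Dict.mk (res0.items ++ [(k, c + t.sum)]) := by
  have hk : k ∉ res0.keys := pvNotMem_of_contains_false res0 k h
  intro t
  induction t with
  | nil => intro c; simp
  | cons v t ih =>
    intro c
    have hmemk : k ∈ (PySem.Dict.mk (res0.items ++ [(k, c)])).keys := by
      simp [PySem.Dict.keys_mk]
    have hstep : sumar_valor k v (PySem.Dict.mk (res0.items ++ [(k, c)]))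
        = PySem.Dict.mk (res0.items ++ [(k, c + v)]) := by
      have hget : (PySem.Dict.mk (res0.items ++ [(k, c)])).getD k 0 = c := by
        apply PySem.Dict.getD_of_mem_items
        · simp
        · simp only [PySem.Dict.keys_mk, List.map_append]
          exact List.Nodup.append hnd (by simp) (by
            intro x hx hx'
            simp only [List.map_cons, List.map_nil, List.mem_cons, List.not_mem_nil, or_false] at hx'
            subst hx'
            exact hk hx)
      have hcon : (PySem.Dict.mk (res0.items ++ [(k, c)])).contains k = true := by
        rw [PySem.Dict.contains_iff_mem_keys]; exact hmemk
      have hins : (PySem.Dict.mk (res0.items ++ [(k, c)])).insert k (c + v)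
          = PySem.Dict.mk (res0.items ++ [(k, c + v)]) := by
        apply PySem.Dict.ext
        rw [PySem.Dict.items_insert_of_contains _ _ hcon]
        show List.map _ (res0.items ++ [(k, c)]) = _
        rw [List.map_append]
        congr 1
        · have : ∀ p ∈ res0.items,
              (if (p.1 == k) = true then ((k, c + v) : String × Int) else p) = id p := by
            intro p hp
            have hpk : p.1 ≠ k := by
              intro hpk
              exact hk (by simpa [PySem.Dict.keys, hpk] using List.mem_map_of_mem (f := Prod.fst) hp)
            simp [hpk]
          rw [List.map_congr_left this, List.map_id]
        · simp
      simp only [sumar_valor]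
      rw [if_pos (by simpa using hmemk), hget, hins]
    rw [List.foldl_cons, hstep, ih (c + v)]
    have : c + v + t.sum = c + (v :: t).sum := by rw [List.sum_cons]; ring
    rw [this]

lemma pvSumarFold (k : String) (res : PySem.Dict String Int)
    (h : res.contains k = false) (hnd : res.keys.Nodup) (vs : List Int) :
    vs.foldl (fun r v => sumar_valor k v r) res
      = if vs = [] then res else PySem.Dict.mk (res.items ++ [(k, vs.sum)]) := by
  have hk : k ∉ res.keys := pvNotMem_of_contains_false res k h
  cases vs with
  | nil => simp
  | cons v t =>
    have hstep : sumar_valor k v res = PySem.Dict.mk (res.items ++ [(k, v)]) := by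
      simp only [sumar_valor]
      rw [if_neg (by simp [hk]), ← PySem.Dict.items_insert_of_not_contains res v h]
    rw [List.foldl_cons, hstep, pvSumarFoldGo k res h hnd t v]
    simp [List.sum_cons]

lemma pvCD_cons (e : String × String) (t : List (String × String)) (k : String) :
    pvCD (e :: t) k = (if e.1 ≠ k ∧ e.2 = "me desvio siempre" then 1 else 0) + pvCD t k := by
  simp only [pvCD, List.countP_cons]
  by_cases h1 : e.1 = k <;> by_cases h3 : e.2 = "me desvio siempre" <;> simp [h1, h3] <;> omega

lemma pvCB_cons (e : String × String) (t : List (String × String)) (k : String) :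
    pvCB (e :: t) k = (if e.1 ≠ k ∧ e.2 = "me la banco y no me desvio" then 1 else 0) + pvCB t k := by
  simp only [pvCB, List.countP_cons]
  by_cases h1 : e.1 = k <;> by_cases h4 : e.2 = "me la banco y no me desvio" <;> simp [h1, h4] <;> omega

lemma pvTrig_sum (l : List (String × String)) (k s : String) :
    (l.filterMap (pvFval k s)).sum =
      if s = "me desvio siempre" then -10 * (pvCD l k : Int) - 15 * (pvCB l k : Int)
      else 10 * (pvCD l k : Int) - 5 * (pvCB l k : Int) := by
  induction l with
  | nil => simp [pvCD, pvCB]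
  | cons e t ih =>
    rw [List.filterMap_cons, pvCD_cons, pvCB_cons]
    by_cases h1 : e.1 = k
    · have hh : pvFval k s e = none := by simp [pvFval, h1]
      rw [hh, ih]
      simp [h1]
    · by_cases h3 : e.2 = "me desvio siempre"
      · have h4 : ¬ e.2 = "me la banco y no me desvio" := by rw [h3]; decide
        have hh : pvFval k s e = some (if s = "me desvio siempre" then -10 else 10) := by
          by_cases h2 : s = "me desvio siempre" <;> simp [pvFval, h1, h2, h3]
        rw [hh, List.sum_cons, ih]
        by_cases h2 : s = "me desvio siempre" <;> simp [h1, h2, h3, h4] <;> push_cast <;> ring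
      · by_cases h4 : e.2 = "me la banco y no me desvio"
        · have hh : pvFval k s e = some (if s = "me desvio siempre" then -15 else -5) := by
            by_cases h2 : s = "me desvio siempre" <;> simp [pvFval, h1, h2, h3, h4]
          rw [hh, List.sum_cons, ih]
          by_cases h2 : s = "me desvio siempre" <;> simp [h1, h2, h3, h4] <;> push_cast <;> ring
        · have hh : pvFval k s e = none := by
            by_cases h2 : s = "me desvio siempre" <;> simp [pvFval, h1, h2, h3, h4]
          rw [hh, ih]
          simp [h3, h4]

lemma pvTrig_len (l : List (String × String)) (k s : String) :
    (l.filterMap (pvFval k s)).length = pvCD l k + pvCB l k := by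
  induction l with
  | nil => simp [pvCD, pvCB]
  | cons e t ih =>
    rw [List.filterMap_cons, pvCD_cons, pvCB_cons]
    by_cases h1 : e.1 = k
    · have hh : pvFval k s e = none := by simp [pvFval, h1]
      rw [hh, ih]
      simp [h1]
    · by_cases h3 : e.2 = "me desvio siempre"
      · have h4 : ¬ e.2 = "me la banco y no me desvio" := by rw [h3]; decide
        have hh : (pvFval k s e).isSome = true := by
          by_cases h2 : s = "me desvio siempre" <;> simp [pvFval, h1, h2, h3]
        obtain ⟨v, hv⟩ := Option.isSome_iff_exists.mp hh
        rw [hv, List.length_cons, ih]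
        simp [h1, h3, h4]
        omega
      · by_cases h4 : e.2 = "me la banco y no me desvio"
        · have hh : (pvFval k s e).isSome = true := by
            by_cases h2 : s = "me desvio siempre" <;> simp [pvFval, h1, h2, h3, h4]
          obtain ⟨v, hv⟩ := Option.isSome_iff_exists.mp hh
          rw [hv, List.length_cons, ih]
          simp [h1, h3, h4]
          omega
        · have hh : pvFval k s e = none := by
            by_cases h2 : s = "me desvio siempre" <;> simp [pvFval, h1, h2, h3, h4]
          rw [hh, ih]
          simp [h3, h4]

lemma pvCount_split (l : List (String × String)) (k s t : String)
    (hnd : (l.map Prod.fst).Nodup) (hm : (k, s) ∈ l) :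
    l.countP (fun e => decide (e.1 ≠ k) && decide (e.2 = t)) + (if s = t then 1 else 0)
      = l.countP (fun e => decide (e.2 = t)) := by
  induction l with
  | nil => simp at hm
  | cons e tl ih =>
    simp only [List.map_cons, List.nodup_cons] at hnd
    rw [List.countP_cons, List.countP_cons]
    rcases List.mem_cons.mp hm with he | htl
    · subst he
      have ht : tl.countP (fun e => decide (e.1 ≠ k) && decide (e.2 = t))
          = tl.countP (fun e => decide (e.2 = t)) := by
        apply List.countP_congr
        intro e' he'
        have he'k : e'.1 ≠ k := by
          intro hh
          have hmm : e'.1 ∈ tl.map Prod.fst := List.mem_map_of_mem (f := Prod.fst) he'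
          rw [hh] at hmm
          exact hnd.1 hmm
        simp [he'k]
      rw [ht]
      have h0 : ((decide ((k, s).1 ≠ k) && decide ((k, s).2 = t)) : Bool) = false := by simp
      rw [h0]
      simp only [Bool.false_eq_true, if_false]
      by_cases hst : s = t
      · rw [if_pos hst, if_pos (show decide ((k, s).2 = t) = true from by simp [hst])]
      · rw [if_neg hst, if_neg (show ¬ decide ((k, s).2 = t) = true from by simp [hst])]
    · have hk : k ∈ tl.map Prod.fst := by
        simpa using List.mem_map_of_mem (f := Prod.fst) htl
      have hek : e.1 ≠ k := fun hh => hnd.1 (hh ▸ hk)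
      rw [← ih hnd.2 htl]
      have hpe : ((decide (e.1 ≠ k) && decide (e.2 = t)) : Bool) = decide (e.2 = t) := by
        simp [hek]
      rw [hpe]
      omega

lemma pvCount_snd (l : List (String × String)) (t : String) :
    (l.map Prod.snd).count t = l.countP (fun e => decide (e.2 = t)) := by
  rw [List.count_eq_countP, List.countP_map]
  apply List.countP_congr
  intro e _
  simp only [Function.comp_apply, beq_iff_eq, decide_eq_true_eq]

lemma pvInner_spec (full : List (String × String)) (k s : String)
    (res : PySem.Dict String Int) (h : res.contains k = false) (hnd : res.keys.Nodup) :
    full.foldl (pvStepA (k, s)) res =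
      if full.filterMap (pvFval k s) = [] then res
      else PySem.Dict.mk (res.items ++ [(k, (full.filterMap (pvFval k s)).sum)]) := by
  have h1 : full.foldl (pvStepA (k, s)) res
      = (full.filterMap (pvFval k s)).foldl (fun r v => sumar_valor k v r) res :=
    by
      rw [List.foldl_filterMap]
      exact PySem.List.foldl_congr_mem full _ _ res (fun acc x _ => by
        rw [pvStepA_eq k s acc x]
        cases pvFval k s x <;> rfl)
  rw [h1, pvSumarFold k res h hnd]

lemma pvStep_agree (full : List (String × String)) (hndfull : (full.map Prod.fst).Nodup)
    (k s : String) (hmem : (k, s) ∈ full) (res : PySem.Dict String Int)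
    (hfk : res.contains k = false) (hndres : res.keys.Nodup) :
    full.foldl (pvStepA (k, s)) res
      = pvStepB ((full.map Prod.snd).count "me desvio siempre" : Int)
          ((full.map Prod.snd).count "me la banco y no me desvio" : Int) res (k, s) := by
  rw [pvInner_spec full k s res hfk hndres]
  have hCD : pvCD full k + (if s = "me desvio siempre" then 1 else 0)
      = full.countP (fun e => decide (e.2 = "me desvio siempre")) :=
    pvCount_split full k s "me desvio siempre" hndfull hmem
  have hCB : pvCB full k + (if s = "me la banco y no me desvio" then 1 else 0)
      = full.countP (fun e => decide (e.2 = "me la banco y no me desvio")) :=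
    pvCount_split full k s "me la banco y no me desvio" hndfull hmem
  have hlen := pvTrig_len full k s
  have hsum := pvTrig_sum full k s
  have hne : (full.filterMap (pvFval k s) = []) ↔ (pvCD full k + pvCB full k = 0) := by
    rw [← List.length_eq_zero_iff, hlen]
  have hins : ∀ v : Int, PySem.Dict.insert res k v = PySem.Dict.mk (res.items ++ [(k, v)]) :=
    fun v => PySem.Dict.ext (PySem.Dict.items_insert_of_not_contains res v hfk)
  rw [pvCount_snd, pvCount_snd]
  by_cases h2 : s = "me desvio siempre"
  · have hsb : ((s == "me desvio siempre") : Bool) = true := by simp [h2]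
    have h2' : s ≠ "me la banco y no me desvio" := by rw [h2]; decide
    rw [if_pos h2] at hsum
    rw [if_pos h2] at hCD
    rw [if_neg h2'] at hCB
    simp only [pvStepB, hsb, ite_true]
    by_cases htrig : full.filterMap (pvFval k s) = []
    · rw [if_pos htrig, if_neg (by have := hne.mp htrig; omega)]
    · have hne' : pvCD full k + pvCB full k ≠ 0 := fun hh => htrig (hne.mpr hh)
      rw [if_neg htrig, if_pos (by omega), hins, hsum]
      exact congrArg (fun z => PySem.Dict.mk (res.items ++ [(k, z)])) (by omega)
  · have hsb : ((s == "me desvio siempre") : Bool) = false := by simpa using h2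
    rw [if_neg h2] at hsum
    rw [if_neg h2] at hCD
    simp only [pvStepB, hsb, Bool.false_eq_true, ite_false]
    by_cases h5 : s = "me la banco y no me desvio"
    · have hsb5 : ((s == "me la banco y no me desvio") : Bool) = true := by simp [h5]
      rw [if_pos h5] at hCB
      simp only [hsb5, ite_true]
      by_cases htrig : full.filterMap (pvFval k s) = []
      · rw [if_pos htrig, if_neg (by have := hne.mp htrig; omega)]
      · have hne' : pvCD full k + pvCB full k ≠ 0 := fun hh => htrig (hne.mpr hh)
        rw [if_neg htrig, if_pos (by omega), hins, hsum]
        exact congrArg (fun z => PySem.Dict.mk (res.items ++ [(k, z)])) (by omega)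
    · have hsb5 : ((s == "me la banco y no me desvio") : Bool) = false := by simpa using h5
      rw [if_neg h5] at hCB
      simp only [hsb5, Bool.false_eq_true, ite_false]
      by_cases htrig : full.filterMap (pvFval k s) = []
      · rw [if_pos htrig, if_neg (by have := hne.mp htrig; omega)]
      · have hne' : pvCD full k + pvCB full k ≠ 0 := fun hh => htrig (hne.mpr hh)
        rw [if_neg htrig, if_pos (by omega), hins, hsum]
        exact congrArg (fun z => PySem.Dict.mk (res.items ++ [(k, z)])) (by omega)

lemma pvOuter (full : List (String × String)) (hndfull : (full.map Prod.fst).Nodup) :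
    ∀ (l : List (String × String)) (res : PySem.Dict String Int),
      (∀ e ∈ l, e ∈ full) → (l.map Prod.fst).Nodup →
      (∀ e ∈ l, res.contains e.1 = false) → res.keys.Nodup →
      l.foldl (fun r jug => full.foldl (pvStepA jug) r) res
        = l.foldl (pvStepB ((full.map Prod.snd).count "me desvio siempre" : Int)
            ((full.map Prod.snd).count "me la banco y no me desvio" : Int)) res := by
  intro l
  induction l with
  | nil => intro res _ _ _ _; rfl
  | cons jug tl ih =>
    intro res hsub hndl hfresh hndres
    obtain ⟨k, s⟩ := jug
    have hmem : (k, s) ∈ full := hsub _ (List.mem_cons_self ..)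
    have hfk : res.contains k = false := hfresh _ (List.mem_cons_self ..)
    have hstep := pvStep_agree full hndfull k s hmem res hfk hndres
    rw [List.foldl_cons, List.foldl_cons, hstep]
    set res' := pvStepB ((full.map Prod.snd).count "me desvio siempre" : Int)
        ((full.map Prod.snd).count "me la banco y no me desvio" : Int) res (k, s) with hres'
    have hkeys' : res'.keys = res.keys ∨ res'.keys = res.keys ++ [k] := by
      rw [hres']
      simp only [pvStepB]
      split_ifs <;>
        first
          | exact Or.inr (PySem.Dict.keys_insert_of_not_contains res _ hfk)
          | exact Or.inl rfl
    simp only [List.map_cons, List.nodup_cons] at hndl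
    have hndres' : res'.keys.Nodup := by
      rcases hkeys' with hh | hh <;> rw [hh]
      · exact hndres
      · exact List.Nodup.append hndres (by simp)
          (by
            intro x hx hx'
            simp only [List.mem_cons, List.not_mem_nil, or_false] at hx'
            rw [hx'] at hx
            exact pvNotMem_of_contains_false res k hfk hx)
    have hfresh' : ∀ e ∈ tl, res'.contains e.1 = false := by
      intro e he
      apply pvContains_false
      have h1 : e.1 ∉ res.keys :=
        pvNotMem_of_contains_false res e.1 (hfresh e (List.mem_cons_of_mem _ he))
      have h2 : e.1 ≠ k := by
        intro hh
        exact hndl.1 (by rw [← hh]; exact List.mem_map_of_mem he)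
      rcases hkeys' with hh | hh <;> rw [hh] <;> simp [h1, h2]
    exact ih res' (fun e he => hsub e (List.mem_cons_of_mem _ he)) hndl.2 hfresh' hndres'

-- ===== VERDICT (by name: the statement is the Claim_ definition above) =====
theorem torneo_de_gallinas_spec : Claim_equal_torneo_de_gallinas := by
  intro est hDom hPre
  show torneo_de_gallinas est = torneo_de_gallinas_alt est
  have hPre' : (est.map Prod.fst).Nodup := hPre
  have hA : torneo_de_gallinas est
      = (est.foldl (fun r jug => est.foldl (pvStepA jug) r) PySem.Dict.empty).items := by
    refine Eq.trans (congrArg PySem.Dict.items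
      (PySem.List.foldl_pyRange_zero_pyGetD' est ("", "")
        (fun res jug => List.foldl (fun r n => pvStepA jug r (PySem.List.pyGetD est n ("", "")))
          res (PySem.List.pyRange 0 (est.length : Int))) PySem.Dict.empty)) ?_
    exact congrArg PySem.Dict.items (PySem.List.foldl_congr_mem est _ _ PySem.Dict.empty
      (fun acc x _ => PySem.List.foldl_pyRange_zero_pyGetD' est ("", "") (pvStepA x) acc))
  have hB : torneo_de_gallinas_alt est
      = (est.foldl (pvStepB (((est.map Prod.snd).count "me desvio siempre" : Nat) : Int)
          (((est.map Prod.snd).count "me la banco y no me desvio" : Nat) : Int))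
          PySem.Dict.empty).items := rfl
  rw [hA, hB]
  congr 1
  exact pvOuter est hPre' est PySem.Dict.empty (fun e he => he) hPre'
    (fun e _ => pvContains_false PySem.Dict.empty e.1 (by simp [PySem.Dict.keys_empty]))
    (by simp [PySem.Dict.keys_empty])
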